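-- pv_equiv track=rewrite | github.com/elthonJhon1906/uas_ai | bfs_jalur_terdekat.py | bfs_shortest_path_with_distance
-- ===== SOURCE A (Python) =====
-- from collections import deque
--
-- def bfs_shortest_path_with_distance(graph, start, goal):
--     queue = deque([([start], 0)])  # Menyimpan tuple: (jalur, total_jarak)
--     visited = {start}
--
--     while queue:
--         path, total_distance = queue.popleft()
--         current_node = path[-1]
--
--         if current_node == goal:
--             return path, total_distance
--
--         for neighbor, distance in graph.get(current_node, {}).items():
--             if neighbor not in visited:
--                 visited.add(neighbor)
--                 new_path = path + [neighbor]
--                 new_total_distance = total_distance + distance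
--                 queue.append((new_path, new_total_distance))
--
--     return None, None
-- ===== SOURCE B (Python) =====
-- from collections import deque
--
-- def bfs_shortest_path_with_distance(graph, start, goal):
--     # BFS over nodes with parent pointers; the path is reconstructed once at the
--     # end instead of copying a growing path list for every queued node.
--     parent = {}
--     dist = {start: 0}
--     queue = deque([start])
--     while queue:
--         node = queue.popleft()
--         if node == goal:
--             path = []
--             while node != start:
--                 path.append(node)
--                 node = parent[node]
--             path.append(start)
--             path.reverse()
--             return path, dist[goal]
--         for neighbor, w in graph.get(node, {}).items():
--             if neighbor not in dist:
--                 parent[neighbor] = node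
--                 dist[neighbor] = dist[node] + w
--                 queue.append(neighbor)
--     return None, None
-- ===== Notes on version B (the rewrite author's own statement) =====
-- stated objective: alternative
-- what changed: B runs BFS over bare nodes with parent-pointer and distance dicts, reconstructing the path once when the goal is popped, instead of A's queue that stores and copies a whole (path, distance) pair for every enqueued node; it trades A's path copying for a final reconstruction pass.
import Mathlib
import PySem

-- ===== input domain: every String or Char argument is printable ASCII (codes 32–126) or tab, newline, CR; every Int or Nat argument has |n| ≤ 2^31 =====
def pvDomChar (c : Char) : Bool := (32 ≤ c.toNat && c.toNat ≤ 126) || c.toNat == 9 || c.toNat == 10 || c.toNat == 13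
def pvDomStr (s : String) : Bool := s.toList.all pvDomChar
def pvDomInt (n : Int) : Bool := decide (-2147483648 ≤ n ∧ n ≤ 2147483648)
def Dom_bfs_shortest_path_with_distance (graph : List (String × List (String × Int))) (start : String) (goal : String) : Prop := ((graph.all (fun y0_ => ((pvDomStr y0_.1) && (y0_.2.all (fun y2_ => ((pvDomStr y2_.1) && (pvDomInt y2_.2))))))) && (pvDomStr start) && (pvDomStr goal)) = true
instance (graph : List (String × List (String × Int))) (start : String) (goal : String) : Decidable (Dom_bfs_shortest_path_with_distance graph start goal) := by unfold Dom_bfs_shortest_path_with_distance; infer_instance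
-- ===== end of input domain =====

-- B replaces A's queue of whole path copies by BFS with parent pointers and a single
-- path reconstruction at the end (objective: alternative; avoids per-enqueue path copies,
-- not measurably faster on the timed random inputs).

-- ===== PORT A =====
-- the while loop, fueled only for totality (fuel = total number of edges + 2 always
-- suffices: every pop consumes fuel, and pops ≤ 1 + pushes ≤ 1 + edges)
def bfsA_loop (graph : List (String × List (String × Int))) (goal : String) :
    Nat → List (List String × Int) → PySem.Set String → Option (List String) × Option Int
  | 0, _, _ => (none, none)
  | fuel+1, queue, visited =>
    match queue with
    | [] => (none, none)
    | (path, total) :: rest =>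
      -- path[-1]; the default is never used: every queued path is nonempty
      let current := (PySem.List.pyGet? path (-1)).getD ""
      if current == goal then (some path, some total)
      else
        let st := (((PySem.Dict.mk graph).get? current).getD []).foldl
          (fun (s : List (List String × Int) × PySem.Set String) e =>
            if s.2.contains e.1 then s
            else (s.1 ++ [(path ++ [e.1], total + e.2)], PySem.Set.add s.2 e.1))
          (rest, visited)
        bfsA_loop graph goal fuel st.1 st.2

def bfs_shortest_path_with_distance (graph : List (String × List (String × Int))) (start : String) (goal : String) : Option (List String) × Option Int :=
  bfsA_loop graph goal (graph.foldl (fun a p => a + p.2.length) 0 + 2)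
    [([start], (0 : Int))] (PySem.Set.ofList [start])

-- ===== PORT B =====
-- the reconstruction while loop of Source B; fuel parent.size + 1 suffices (the parent
-- chain visits distinct keys); none = the KeyError branch, unreachable for BFS-discovered nodes
def pvRebuild (parent : PySem.Dict String String) (start : String) :
    Nat → String → List String → Option (List String)
  | 0, _, _ => none
  | f+1, node, path =>
    if node == start then some ((path ++ [node]).reverse)
    else match PySem.Dict.get? parent node with
      | none => none
      | some p => pvRebuild parent start f p (path ++ [node])

def bfsB_loop (graph : List (String × List (String × Int))) (start goal : String) :
    Nat → List String → PySem.Dict String String → PySem.Dict String Int → Option (List String) × Option Int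
  | 0, _, _, _ => (none, none)
  | fuel+1, queue, parent, dist =>
    match queue with
    | [] => (none, none)
    | node :: rest =>
      if node == goal then
        (pvRebuild parent start (parent.size + 1) node [], PySem.Dict.get? dist goal)
      else
        let st := (((PySem.Dict.mk graph).get? node).getD []).foldl
          (fun (s : List String × PySem.Dict String String × PySem.Dict String Int) e =>
            if s.2.2.contains e.1 then s
            else (s.1 ++ [e.1], s.2.1.insert e.1 node,
                  s.2.2.insert e.1 ((PySem.Dict.get? s.2.2 node).getD 0 + e.2)))
          (rest, parent, dist)
        bfsB_loop graph start goal fuel st.1 st.2.1 st.2.2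

def bfs_shortest_path_with_distance_alt (graph : List (String × List (String × Int))) (start : String) (goal : String) : Option (List String) × Option Int :=
  bfsB_loop graph start goal (graph.foldl (fun a p => a + p.2.length) 0 + 2)
    [start] PySem.Dict.empty (PySem.Dict.empty.insert start (0 : Int))

-- ===== PRECONDITION & SPEC =====
def Spec_bfs_shortest_path_with_distance (graph : List (String × List (String × Int))) (start : String) (goal : String) (out : Option (List String) × Option Int) : Prop := out = bfs_shortest_path_with_distance_alt graph start goal
instance (graph : List (String × List (String × Int))) (start : String) (goal : String) (out : Option (List String) × Option Int) : Decidable (Spec_bfs_shortest_path_with_distance graph start goal out) := by unfold Spec_bfs_shortest_path_with_distance; infer_instance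

-- ===== CLAIM (what is proved, stated in full; the proofs are below) =====
def Claim_equal_bfs_shortest_path_with_distance : Prop := ∀ (graph : List (String × List (String × Int))) (start : String) (goal : String), Dom_bfs_shortest_path_with_distance graph start goal → Spec_bfs_shortest_path_with_distance graph start goal (bfs_shortest_path_with_distance graph start goal)

-- ===== LEMMAS AND PROOFS =====

-- the per-queue-entry relation: A's stored (path, total) for node n is what B can
-- reconstruct from its parent pointers, and B's stored distance for n
def pvR (start : String) (parent : PySem.Dict String String) (dist : PySem.Dict String Int)
    (pd : List String × Int) (n : String) : Prop :=
  pvRebuild parent start (parent.size + 1) n [] = some pd.1 ∧ PySem.Dict.get? dist n = some pd.2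

theorem pvRebuild_mono (parent : PySem.Dict String String) (start : String) :
    ∀ (f : Nat) (n : String) (acc r : List String),
      pvRebuild parent start f n acc = some r → pvRebuild parent start (f+1) n acc = some r := by
  intro f
  induction f with
  | zero => intro n acc r h; simp [pvRebuild] at h
  | succ f ih =>
    intro n acc r h
    by_cases hs : (n == start) = true
    · simpa [pvRebuild, hs] using h
    · cases hp : PySem.Dict.get? parent n with
      | none => simp [pvRebuild, hs, hp] at h
      | some p =>
        simp only [pvRebuild, hs, if_false, hp] at h ⊢
        exact ih _ _ _ h

theorem pvRebuild_stab (parent : PySem.Dict String String) (start k v : String)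
    (hk : PySem.Dict.get? parent k = none) :
    ∀ (f : Nat) (n : String) (acc r : List String),
      pvRebuild parent start f n acc = some r →
      pvRebuild (parent.insert k v) start f n acc = some r := by
  intro f
  induction f with
  | zero => intro n acc r h; simp [pvRebuild] at h
  | succ f ih =>
    intro n acc r h
    by_cases hs : (n == start) = true
    · simpa [pvRebuild, hs] using h
    · cases hp : PySem.Dict.get? parent n with
      | none => simp [pvRebuild, hs, hp] at h
      | some p =>
        have hnk : n ≠ k := by
          intro he; rw [he, hk] at hp; exact (Option.some_ne_none p hp.symm).elim
        have hp' : PySem.Dict.get? (parent.insert k v) n = some p := by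
          rw [PySem.Dict.get?_insert]; simp [hnk, hp]
        simp only [pvRebuild, hs, if_false, hp, hp'] at h ⊢
        exact ih _ _ _ h

theorem pvRebuild_acc (parent : PySem.Dict String String) (start : String) :
    ∀ (f : Nat) (n : String) (acc : List String),
      pvRebuild parent start f n acc
        = Option.map (fun b => b ++ acc.reverse) (pvRebuild parent start f n []) := by
  intro f
  induction f with
  | zero => intro n acc; simp [pvRebuild]
  | succ f ih =>
    intro n acc
    by_cases hs : (n == start) = true
    · simp [pvRebuild, hs]
    · cases hp : PySem.Dict.get? parent n with
      | none => simp [pvRebuild, hs, hp]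
      | some p =>
        have h1 := ih p (acc ++ [n])
        have h2 := ih p [n]
        simp only [pvRebuild, hs, hp]
        simp only [Bool.false_eq_true, if_false, List.nil_append, h1, h2]
        cases pvRebuild parent start f p [] with
        | none => rfl
        | some b => simp

theorem pvRebuild_last (parent : PySem.Dict String String) (start : String)
    (f : Nat) (n : String) (r : List String)
    (h : pvRebuild parent start f n [] = some r) : r.getLast? = some n := by
  cases f with
  | zero => simp [pvRebuild] at h
  | succ f =>
    by_cases hs : (n == start) = true
    · have : n = start := by simpa using hs
      subst this
      simp [pvRebuild] at h
      simp [← h]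
    · cases hp : PySem.Dict.get? parent n with
      | none => simp [pvRebuild, hs, hp] at h
      | some p =>
        simp only [pvRebuild, hs, if_false, hp] at h
        rw [pvRebuild_acc] at h
        cases hb : pvRebuild parent start f p [] with
        | none => rw [hb] at h; simp at h
        | some b => rw [hb] at h; simp at h; simp [← h]

theorem pv_lift (start : String) (parent : PySem.Dict String String) (dist : PySem.Dict String Int)
    (k cur : String) (w : Int)
    (hk : parent.contains k = false) (hkd : dist.contains k = false)
    (pd : List String × Int) (n : String) (h : pvR start parent dist pd n) :
    pvR start (parent.insert k cur) (dist.insert k w) pd n := by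
  obtain ⟨hr, hd⟩ := h
  have hknone : PySem.Dict.get? parent k = none := by
    rw [PySem.Dict.contains_eq_isSome_get?] at hk
    exact Option.not_isSome_iff_eq_none.mp (by simp [hk])
  have hnk : n ≠ k := by
    intro he
    subst he
    rw [PySem.Dict.contains_eq_isSome_get?, hd] at hkd
    simp at hkd
  constructor
  · have h1 := pvRebuild_stab parent start k cur hknone _ _ _ _ hr
    have h2 := pvRebuild_mono (parent.insert k cur) start _ _ _ _ h1
    have hsz : (parent.insert k cur).size = parent.size + 1 := by
      rw [PySem.Dict.size_insert]; simp [hk]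
    rw [hsz]
    exact h2
  · rw [PySem.Dict.get?_insert]; simp [hnk]; exact hd

theorem pvRebuild_step (parent : PySem.Dict String String) (start : String) (f : Nat)
    (node p : String) (acc : List String)
    (hns : (node == start) = false) (hg : PySem.Dict.get? parent node = some p) :
    pvRebuild parent start (f+1) node acc = pvRebuild parent start f p (acc ++ [node]) := by
  simp only [pvRebuild, hns, Bool.false_eq_true, if_false, hg]

theorem pv_fold_step (graph : List (String × List (String × Int))) (start cur : String)
    (path : List String) (total : Int) :
    ∀ (L : List (String × Int)) (qA : List (List String × Int)) (qB : List String)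
      (visited : PySem.Set String) (parent : PySem.Dict String String) (dist : PySem.Dict String Int),
      List.Forall₂ (pvR start parent dist) qA qB →
      (∀ x, visited.contains x = dist.contains x) →
      dist.contains start = true →
      (∀ x, parent.contains x = true → dist.contains x = true) →
      pvRebuild parent start (parent.size + 1) cur [] = some path →
      PySem.Dict.get? dist cur = some total →
      (let sA := L.foldl
          (fun (s : List (List String × Int) × PySem.Set String) e =>
            if s.2.contains e.1 then s
            else (s.1 ++ [(path ++ [e.1], total + e.2)], PySem.Set.add s.2 e.1)) (qA, visited)
       let sB := L.foldl
          (fun (s : List String × PySem.Dict String String × PySem.Dict String Int) e =>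
            if s.2.2.contains e.1 then s
            else (s.1 ++ [e.1], s.2.1.insert e.1 cur,
                  s.2.2.insert e.1 ((PySem.Dict.get? s.2.2 cur).getD 0 + e.2))) (qB, parent, dist)
       List.Forall₂ (pvR start sB.2.1 sB.2.2) sA.1 sB.1 ∧
       (∀ x, sA.2.contains x = sB.2.2.contains x) ∧
       sB.2.2.contains start = true ∧
       (∀ x, sB.2.1.contains x = true → sB.2.2.contains x = true)) := by
  intro L
  induction L with
  | nil =>
    intro qA qB visited parent dist h1 h2 h3 h4 hc1 hc2
    exact ⟨h1, h2, h3, h4⟩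
  | cons e L ih =>
    intro qA qB visited parent dist h1 h2 h3 h4 hc1 hc2
    simp only [List.foldl_cons]
    by_cases hv : dist.contains e.1 = true
    · have hv' : visited.contains e.1 = true := by rw [h2]; exact hv
      simp only [hv, hv', if_true]
      exact ih _ _ _ _ _ h1 h2 h3 h4 hc1 hc2
    · have hvb : dist.contains e.1 = false := by simpa using hv
      have hv' : visited.contains e.1 = false := by rw [h2]; exact hvb
      simp only [hvb, hv', Bool.false_eq_true, if_false]
      have hpar : parent.contains e.1 = false := by
        cases hp : parent.contains e.1 with
        | false => rfl
        | true => rw [h4 _ hp] at hvb; exact Bool.noConfusion hvb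
      have hknone : PySem.Dict.get? parent e.1 = none := by
        rw [PySem.Dict.contains_eq_isSome_get?] at hpar
        exact Option.not_isSome_iff_eq_none.mp (by simp [hpar])
      have hnes : e.1 ≠ start := by
        intro he; rw [he, h3] at hvb; exact Bool.noConfusion hvb
      have hcurne : cur ≠ e.1 := by
        intro he
        rw [PySem.Dict.contains_eq_isSome_get?, ← he, hc2] at hvb
        simp at hvb
      have hsz : (parent.insert e.1 cur).size = parent.size + 1 := by
        rw [PySem.Dict.size_insert]; simp [hpar]
      -- value B stores for the new node
      have hval : (PySem.Dict.get? dist cur).getD 0 + e.2 = total + e.2 := by rw [hc2]; rfl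
      rw [hval]
      -- cur's certificate over the extended maps
      have hc1' : pvRebuild (parent.insert e.1 cur) start ((parent.insert e.1 cur).size + 1) cur [] = some path := by
        rw [hsz]
        exact pvRebuild_mono _ _ _ _ _ _ (pvRebuild_stab parent start e.1 cur hknone _ _ _ _ hc1)
      have hc2' : PySem.Dict.get? (dist.insert e.1 (total + e.2)) cur = some total := by
        rw [PySem.Dict.get?_insert]; simp [hcurne]; exact hc2
      -- the new queue entry satisfies pvR
      have hnew : pvR start (parent.insert e.1 cur) (dist.insert e.1 (total + e.2))
          (path ++ [e.1], total + e.2) e.1 := by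
        constructor
        · rw [hsz]
          show pvRebuild (parent.insert e.1 cur) start (parent.size + 1 + 1) e.1 [] = some (path ++ [e.1])
          have hs1 : (e.1 == start) = false := by simp [hnes]
          have hg : PySem.Dict.get? (parent.insert e.1 cur) e.1 = some cur :=
            PySem.Dict.get?_insert_self _ _ _
          rw [pvRebuild_step (parent.insert e.1 cur) start (parent.size + 1) e.1 cur [] hs1 hg]
          rw [pvRebuild_acc]
          have hstab := pvRebuild_stab parent start e.1 cur hknone _ _ _ _ hc1
          rw [hstab]
          simp
        · rw [PySem.Dict.get?_insert_self]
      have h1' : List.Forall₂ (pvR start (parent.insert e.1 cur) (dist.insert e.1 (total + e.2)))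
          (qA ++ [(path ++ [e.1], total + e.2)]) (qB ++ [e.1]) := by
        exact List.rel_append
          (List.Forall₂.imp (fun pd n h => pv_lift start parent dist e.1 cur (total + e.2) hpar hvb pd n h) h1)
          (List.Forall₂.cons hnew List.Forall₂.nil)
      have h2' : ∀ x, (PySem.Set.add visited e.1).contains x = (dist.insert e.1 (total + e.2)).contains x := by
        intro x
        rw [PySem.Dict.contains_insert]
        simp only [PySem.Set.add, hv', Bool.false_eq_true, if_false]
        rw [← h2 x]
        simp [Bool.or_comm, beq_eq_decide]
      have h3' : (dist.insert e.1 (total + e.2)).contains start = true := by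
        rw [PySem.Dict.contains_insert, h3]; simp
      have h4' : ∀ x, (parent.insert e.1 cur).contains x = true →
          (dist.insert e.1 (total + e.2)).contains x = true := by
        intro x hx
        rw [PySem.Dict.contains_insert] at hx ⊢
        cases hxe : (x == e.1) with
        | true => simp [hxe]
        | false => simp [hxe] at hx ⊢; exact h4 _ hx
      exact ih _ _ _ _ _ h1' h2' h3' h4' hc1' hc2'


theorem pv_loop_eq (graph : List (String × List (String × Int))) (start goal : String) :
    ∀ (fuel : Nat) (qA : List (List String × Int)) (qB : List String)
      (visited : PySem.Set String) (parent : PySem.Dict String String) (dist : PySem.Dict String Int),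
      List.Forall₂ (pvR start parent dist) qA qB →
      (∀ x, visited.contains x = dist.contains x) →
      dist.contains start = true →
      (∀ x, parent.contains x = true → dist.contains x = true) →
      bfsA_loop graph goal fuel qA visited = bfsB_loop graph start goal fuel qB parent dist := by
  intro fuel
  induction fuel with
  | zero =>
    intro qA qB visited parent dist h1 h2 h3 h4
    simp [bfsA_loop, bfsB_loop]
  | succ fuel ih =>
    intro qA qB visited parent dist h1 h2 h3 h4
    cases h1 with
    | nil => simp [bfsA_loop, bfsB_loop]
    | @cons p n qA' qB' hR h1' =>
      obtain ⟨hreb, hdist⟩ := hR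
      have hlast : (PySem.List.pyGet? p.1 (-1)).getD "" = n := by
        rw [PySem.List.pyGet?_neg_one, pvRebuild_last parent start _ _ _ hreb]
        rfl
      simp only [bfsA_loop, bfsB_loop, hlast]
      by_cases hg : (n == goal) = true
      · have hng : n = goal := by simpa using hg
        simp only [hg, if_true]
        subst hng
        rw [hreb, hdist]
      · simp only [hg, Bool.false_eq_true, if_false]
        have hstep := pv_fold_step graph start n p.1 p.2
          (((PySem.Dict.mk graph).get? n).getD []) qA' qB' visited parent dist
          h1' h2 h3 h4 hreb hdist
        obtain ⟨i1, i2, i3, i4⟩ := hstep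
        exact ih _ _ _ _ _ i1 i2 i3 i4

-- ===== VERDICT (by name: the statement is the Claim_ definition above) =====
theorem bfs_shortest_path_with_distance_spec : Claim_equal_bfs_shortest_path_with_distance := by
  intro graph start goal _
  unfold Spec_bfs_shortest_path_with_distance bfs_shortest_path_with_distance bfs_shortest_path_with_distance_alt
  apply pv_loop_eq
  · refine List.Forall₂.cons ?_ List.Forall₂.nil
    constructor
    · show pvRebuild PySem.Dict.empty start (PySem.Dict.empty.size + 1) start [] = some [start]
      simp [pvRebuild, PySem.Dict.size_empty]
    · exact PySem.Dict.get?_insert_self _ _ _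
  · intro x
    rw [PySem.Dict.contains_insert, PySem.Dict.contains_empty]
    simp [PySem.Set.ofList, PySem.Set.add, beq_eq_decide]
  · rw [PySem.Dict.contains_insert]; simp
  · intro x hx
    rw [PySem.Dict.contains_empty] at hx
    exact Bool.noConfusion hx
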